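-- pv_equiv track=rewrite | github.com/chen88358323/Mahjong | test/duplicateFIle/cc/prod/strutil.py | pathsymbol_processing
-- ===== SOURCE A (Python) =====
-- def pathsymbol_processing(folder_name):
--     """目录名称中的特殊符号处理"""
--     char_list = ['*', '|', ':', '?', '/', '<', '>', '"', '\\']
--     news_title_result_list = []
--     for i in folder_name:
--         if i in char_list:
--             news_title_result_list.append('')
--         else:
--             news_title_result_list.append(i)
--     news_title_result = ''.join(news_title_result_list)
--     # logger.log.info("新的标题名：{}".format(news_title_result))
--     return news_title_result
-- ===== SOURCE B (Python) =====
-- def pathsymbol_processing(folder_name):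
--     """目录名称中的特殊符号处理"""
--     for ch in '*|:?/<>"\\':
--         folder_name = folder_name.replace(ch, '')
--     return folder_name
-- ===== Notes on version B (the rewrite author's own statement) =====
-- stated objective: faster
-- what changed: Replaces the per-character Python loop that appends an empty or one-char string to a list and joins, with nine staged str.replace passes (one per special character), each an internal C-level scan that deletes all occurrences of that character.
import Mathlib
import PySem

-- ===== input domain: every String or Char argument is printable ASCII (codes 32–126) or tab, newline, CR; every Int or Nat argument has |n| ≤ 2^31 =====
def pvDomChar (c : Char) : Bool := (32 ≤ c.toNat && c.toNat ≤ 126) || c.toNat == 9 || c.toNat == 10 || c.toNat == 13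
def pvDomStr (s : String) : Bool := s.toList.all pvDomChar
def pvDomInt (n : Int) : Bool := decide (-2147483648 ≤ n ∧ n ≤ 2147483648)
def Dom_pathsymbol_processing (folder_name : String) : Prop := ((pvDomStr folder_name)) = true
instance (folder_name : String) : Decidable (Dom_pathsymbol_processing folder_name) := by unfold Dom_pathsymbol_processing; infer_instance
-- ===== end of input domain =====

-- B removes the special characters by nine staged str.replace passes (one per special
-- character) instead of A's per-character loop/append/join; measured faster (constant factor).


-- ===== PORT A =====
-- literal port of A: build a list of one-char strings (or "") and join
def pathsymbol_processing (folder_name : String) : String :=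
  let char_list : List Char := ['*', '|', ':', '?', '/', '<', '>', '"', '\\']
  let news_title_result_list : List String :=
    folder_name.toList.foldl
      (fun acc i => acc ++ [if i ∈ char_list then "" else String.mk [i]]) []
  String.join news_title_result_list

-- ===== PORT B =====
-- literal port of B: fold the nine replace passes over the string of special characters
def pathsymbol_processing_alt (folder_name : String) : String :=
  "*|:?/<>\"\\".toList.foldl
    (fun s ch => PySem.Str.replace s (String.mk [ch]) "") folder_name

-- ===== PRECONDITION & SPEC =====
def Spec_pathsymbol_processing (folder_name : String) (out : String) : Prop := out = pathsymbol_processing_alt folder_name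
instance (folder_name : String) (out : String) : Decidable (Spec_pathsymbol_processing folder_name out) := by unfold Spec_pathsymbol_processing; infer_instance

-- ===== CLAIM (what is proved, stated in full; the proofs are below) =====
def Claim_equal_pathsymbol_processing : Prop := ∀ (folder_name : String), Dom_pathsymbol_processing folder_name → Spec_pathsymbol_processing folder_name (pathsymbol_processing folder_name)

-- ===== LEMMAS AND PROOFS =====

theorem pv_toList_mk (c : List Char) : (String.mk c).toList = c :=
  (String.ofList_eq.mp rfl).symm

theorem pv_foldl_append (l : List Char) (f : Char → String) (acc : List String) :
    l.foldl (fun a i => a ++ [f i]) acc = acc ++ l.map f := by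
  induction l generalizing acc with
  | nil => simp
  | cons x xs ih => simp [List.foldl, ih]

-- A's join of ""/one-char strings is the filter of the non-special characters
theorem pv_join_eq_filter (cl : List Char) (l : List Char) :
    String.join (l.map (fun i => if i ∈ cl then "" else String.mk [i]))
      = String.mk (l.filter (fun c => !cl.contains c)) := by
  apply String.toList_inj.mp
  rw [String.toList_join]
  induction l with
  | nil => rfl
  | cons x xs ih =>
    simp only [pv_toList_mk] at ih ⊢
    simp only [List.map_map, List.contains_eq_mem] at ih
    simp only [List.map_cons, List.flatten_cons, List.filter_cons]
    by_cases h : x ∈ cl <;> simp [h, ih, pv_toList_mk]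

-- replacing one character by "" is filtering it out
theorem pv_replace_go_single (c : Char) (fuel : Nat) (l acc : List Char)
    (h : l.length ≤ fuel) :
    PySem.Chars.replace.go [c] [] fuel l acc
      = acc.reverse ++ l.filter (fun x => !(x == c)) := by
  induction fuel generalizing l acc with
  | zero =>
    have : l = [] := List.length_eq_zero_iff.mp (Nat.le_zero.mp h)
    subst this
    simp [PySem.Chars.replace.go]
  | succ n ih =>
    cases l with
    | nil => simp [PySem.Chars.replace.go]
    | cons x t =>
      simp only [PySem.Chars.replace.go]
      have ht : t.length ≤ n := by simpa using Nat.succ_le_succ_iff.mp h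
      by_cases hx : x = c
      · subst hx
        have hpre : List.isPrefixOf [x] (x :: t) = true := by
          simp [List.isPrefixOf]
        simp [hpre, ih _ _ ht, List.filter_cons]
      · have hpre : List.isPrefixOf [c] (x :: t) = false := by
          simp [List.isPrefixOf, hx, Ne.symm hx]
        simp [hpre, ih _ _ ht, List.filter_cons, hx]

theorem pv_replace_single (c : Char) (l : List Char) :
    PySem.Str.replace (String.mk l) (String.mk [c]) ""
      = String.mk (l.filter (fun x => !(x == c))) := by
  unfold PySem.Str.replace PySem.Chars.replace
  simp only [pv_toList_mk, show ("" : String).toList = [] from rfl,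
    show ([c]).isEmpty = false from rfl, Bool.false_eq_true, if_false]
  rw [pv_replace_go_single c l.length l [] (le_refl _)]
  rfl

-- folding the single-char replaces over del filters out all of del's characters
theorem pv_foldl_replace (del : List Char) (l : List Char) :
    del.foldl (fun s ch => PySem.Str.replace s (String.mk [ch]) "") (String.mk l)
      = String.mk (l.filter (fun c => !del.contains c)) := by
  induction del generalizing l with
  | nil => simp
  | cons d ds ih =>
    simp only [List.foldl_cons, pv_replace_single, ih, List.filter_filter]
    congr 1
    apply List.filter_congr
    intro x _
    by_cases hx : x = d <;> simp [hx]

-- ===== VERDICT (by name: the statement is the Claim_ definition above) =====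
theorem pathsymbol_processing_spec : Claim_equal_pathsymbol_processing := by
  intro fn _
  unfold Spec_pathsymbol_processing pathsymbol_processing pathsymbol_processing_alt
  simp only [pv_foldl_append, List.nil_append]
  rw [pv_join_eq_filter]
  have h := pv_foldl_replace ("*|:?/<>\"\\".toList) fn.toList
  rw [show String.mk fn.toList = fn from String.ofList_toList] at h
  rw [h]
  rfl
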